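-- pv_equiv track=rewrite | github.com/holbizmetrics/primes-research | factoring_groebner.py | build_polynomial_system
-- ===== SOURCE A (Python) =====
-- def build_polynomial_system(ones_pp, bits):
--     """
--     Build the polynomial system:
--     For each k: Σᵢ pᵢ × qₖ₋ᵢ = ones_pp[k]
--
--     Variables: p0, p1, ..., p_{n-1}, q0, q1, ..., q_{n-1}
--
--     Returns list of (coefficients, constant) tuples
--     Each equation: sum of products = constant
--     """
--     equations = []
--
--     for k in range(2 * bits - 1):
--         # Equation: Σᵢ pᵢqₖ₋ᵢ = ones_pp[k]
--         terms = []  # List of (i, j) pairs where we have pᵢqⱼ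
--         for i in range(bits):
--             j = k - i
--             if 0 <= j < bits:
--                 terms.append((i, j))
--         equations.append((terms, ones_pp[k]))
--
--     return equations
-- ===== SOURCE B (Python) =====
-- def build_polynomial_system(ones_pp, bits):
--     # Scatter each product p_i*q_j into the bucket of its convolution index i+j,
--     # then pair every bucket with its constant.
--     buckets = [[] for _ in range(2 * bits - 1)]
--     for i in range(bits):
--         for j in range(bits):
--             buckets[i + j].append((i, j))
--     return [(buckets[k], ones_pp[k]) for k in range(2 * bits - 1)]
-- ===== Notes on version B (the rewrite author's own statement) =====
-- stated objective: alternative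
-- what changed: Replaces A's per-k rescan of all i with bounds checks by a single scatter pass that routes each pair (i,j) into bucket i+j, then pairs buckets with constants.
import Mathlib
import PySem

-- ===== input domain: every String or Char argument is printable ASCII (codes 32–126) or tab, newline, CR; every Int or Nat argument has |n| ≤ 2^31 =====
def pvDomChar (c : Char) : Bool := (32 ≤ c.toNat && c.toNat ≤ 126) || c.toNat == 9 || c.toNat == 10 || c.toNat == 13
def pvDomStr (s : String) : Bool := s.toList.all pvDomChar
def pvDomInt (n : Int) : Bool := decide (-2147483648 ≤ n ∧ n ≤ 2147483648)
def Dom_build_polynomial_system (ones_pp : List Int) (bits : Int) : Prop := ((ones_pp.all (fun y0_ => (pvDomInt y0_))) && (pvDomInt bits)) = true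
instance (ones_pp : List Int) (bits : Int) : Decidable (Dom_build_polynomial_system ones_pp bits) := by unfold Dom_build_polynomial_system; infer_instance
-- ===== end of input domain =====

-- B replaces A's per-k rescan of all i by one scatter of every pair (i,j) into bucket i+j (alternative decomposition, same cost).

-- ===== PORT A =====
def build_polynomial_system (ones_pp : List Int) (bits : Int) : List ((List (Int × Int)) × Int) :=
  (PySem.List.pyRange 0 (2 * bits - 1) 1).foldl (fun equations k =>
    let terms := (PySem.List.pyRange 0 bits 1).foldl (fun ts i =>
      let j := k - i
      if 0 ≤ j ∧ j < bits then ts ++ [(i, j)] else ts) []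
    equations ++ [(terms, PySem.List.pyGetD ones_pp k 0)]) []

-- ===== PORT B =====
def build_polynomial_system_alt (ones_pp : List Int) (bits : Int) : List ((List (Int × Int)) × Int) :=
  let buckets0 : List (List (Int × Int)) := (PySem.List.pyRange 0 (2 * bits - 1) 1).map (fun _ => [])
  let buckets := (PySem.List.pyRange 0 bits 1).foldl (fun bk i =>
      (PySem.List.pyRange 0 bits 1).foldl (fun b j =>
        PySem.List.pySetD b (i + j) (PySem.List.pyGetD b (i + j) [] ++ [(i, j)])) bk) buckets0
  (PySem.List.pyRange 0 (2 * bits - 1) 1).map (fun k =>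
    (PySem.List.pyGetD buckets k [], PySem.List.pyGetD ones_pp k 0))

-- ===== PRECONDITION & SPEC =====
-- Pre_ excludes exactly the inputs on which the Python A raises IndexError (ones_pp shorter than 2*bits-1); A returns on all other inputs.
def Pre_build_polynomial_system (ones_pp : List Int) (bits : Int) : Prop :=
  2 * bits - 1 ≤ (ones_pp.length : Int)
instance (ones_pp : List Int) (bits : Int) : Decidable (Pre_build_polynomial_system ones_pp bits) := by unfold Pre_build_polynomial_system; infer_instance
def pvWitness_build_polynomial_system : List Int × Int := ([3, 1, 2], 2)

def Spec_build_polynomial_system (ones_pp : List Int) (bits : Int) (out : List ((List (Int × Int)) × Int)) : Prop := out = build_polynomial_system_alt ones_pp bits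
instance (ones_pp : List Int) (bits : Int) (out : List ((List (Int × Int)) × Int)) : Decidable (Spec_build_polynomial_system ones_pp bits out) := by unfold Spec_build_polynomial_system; infer_instance

-- ===== CLAIM (what is proved, stated in full; the proofs are below) =====
def Claim_equal_build_polynomial_system : Prop := ∀ (ones_pp : List Int) (bits : Int), Dom_build_polynomial_system ones_pp bits → Pre_build_polynomial_system ones_pp bits → Spec_build_polynomial_system ones_pp bits (build_polynomial_system ones_pp bits)

-- ===== LEMMAS AND PROOFS =====

theorem pv_getD_setD {β : Type} (xs : List β) (m k : Int) (v d : β)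
    (h0m : 0 ≤ m) (h0k : 0 ≤ k) (hk : k < (xs.length : Int)) :
    PySem.List.pyGetD (PySem.List.pySetD xs m v) k d
      = if k = m then v else PySem.List.pyGetD xs k d := by
  rw [PySem.List.pySetD_of_nonneg xs v h0m,
      PySem.List.pyGetD_eq_getElem _ d h0k (by simpa using hk),
      PySem.List.pyGetD_eq_getElem _ d h0k hk]
  rw [List.getElem_set]
  by_cases hkm : k = m
  · subst hkm; simp
  · rw [if_neg (by omega), if_neg hkm]

theorem pv_len_inner (i : Int) (l : List Int) :
    ∀ bk : List (List (Int × Int)),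
      ((l.foldl (fun b j => PySem.List.pySetD b (i + j) (PySem.List.pyGetD b (i + j) [] ++ [(i, j)])) bk).length = bk.length) := by
  induction l with
  | nil => intro bk; rfl
  | cons x l ih => intro bk; rw [List.foldl_cons, ih, PySem.List.length_pySetD]

theorem pv_inner_scatter (bits i : Int) (hi : 0 ≤ i) :
    ∀ (n : ℕ) (a : Int) (bk : List (List (Int × Int))) (k : Int),
      (bits - a).toNat = n → 0 ≤ a → 0 ≤ k → k < (bk.length : Int) →
      PySem.List.pyGetD ((PySem.List.pyRange a bits 1).foldl
          (fun b j => PySem.List.pySetD b (i + j) (PySem.List.pyGetD b (i + j) [] ++ [(i, j)])) bk) k []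
        = PySem.List.pyGetD bk k [] ++ (if a ≤ k - i ∧ k - i < bits then [(i, k - i)] else []) := by
  intro n
  induction n with
  | zero =>
    intro a bk k hn ha h0k hk
    rw [PySem.List.pyRange_one_eq_nil (by omega), if_neg (by omega)]
    simp
  | succ n ih =>
    intro a bk k hn ha h0k hk
    rw [PySem.List.pyRange_one_cons (by omega), List.foldl_cons]
    rw [ih (a + 1) _ k (by omega) (by omega) h0k (by rw [PySem.List.length_pySetD]; exact hk)]
    rw [pv_getD_setD _ _ _ _ _ (by omega) h0k hk]
    by_cases hka : k = i + a
    · rw [if_pos hka, if_neg (by omega), if_pos (by omega)]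
      simp [hka]
    · rw [if_neg hka]
      by_cases hc : a + 1 ≤ k - i ∧ k - i < bits
      · rw [if_pos hc, if_pos (show a ≤ k - i ∧ k - i < bits by omega)]
      · rw [if_neg hc, if_neg (show ¬(a ≤ k - i ∧ k - i < bits) by omega), List.append_nil]

theorem pv_foldl_if_append {β : Type} (C : Int → Prop) [DecidablePred C] (f : Int → β) :
    ∀ (l : List Int) (init : List β),
      l.foldl (fun ts i => if C i then ts ++ [f i] else ts) init
        = init ++ l.foldl (fun ts i => if C i then ts ++ [f i] else ts) [] := by
  intro l
  induction l with
  | nil => intro init; simp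
  | cons x l ih =>
    intro init
    rw [List.foldl_cons, List.foldl_cons, ih, ih (if C x then [] ++ [f x] else [])]
    by_cases hx : C x
    · rw [if_pos hx, if_pos hx, List.nil_append, List.append_assoc]
    · rw [if_neg hx, if_neg hx, List.nil_append]

theorem pv_outer_scatter (bits : Int) :
    ∀ (n : ℕ) (a : Int) (bk : List (List (Int × Int))) (k : Int),
      (bits - a).toNat = n → 0 ≤ a → 0 ≤ k → k < (bk.length : Int) →
      PySem.List.pyGetD ((PySem.List.pyRange a bits 1).foldl
          (fun bk i => (PySem.List.pyRange 0 bits 1).foldl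
            (fun b j => PySem.List.pySetD b (i + j) (PySem.List.pyGetD b (i + j) [] ++ [(i, j)])) bk) bk) k []
        = PySem.List.pyGetD bk k [] ++ (PySem.List.pyRange a bits 1).foldl
            (fun ts i => if 0 ≤ k - i ∧ k - i < bits then ts ++ [(i, k - i)] else ts) [] := by
  intro n
  induction n with
  | zero =>
    intro a bk k hn ha h0k hk
    rw [PySem.List.pyRange_one_eq_nil (a := a) (b := bits) (by omega)]
    simp
  | succ n ih =>
    intro a bk k hn ha h0k hk
    rw [PySem.List.pyRange_one_cons (a := a) (b := bits) (by omega), List.foldl_cons, List.foldl_cons]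
    rw [ih (a + 1) _ k (by omega) (by omega) h0k (by rw [pv_len_inner]; exact hk)]
    rw [pv_inner_scatter bits a ha (bits - 0).toNat 0 bk k rfl le_rfl h0k hk]
    by_cases hc : 0 ≤ k - a ∧ k - a < bits
    · rw [if_pos hc, if_pos hc, List.nil_append,
          pv_foldl_if_append (fun i => 0 ≤ k - i ∧ k - i < bits) (fun i => (i, k - i)) _ [(a, k - a)],
          List.append_assoc]
    · rw [if_neg hc, if_neg hc]; simp

theorem pv_main (ones_pp : List Int) (bits : Int) :
    build_polynomial_system ones_pp bits = build_polynomial_system_alt ones_pp bits := by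
  simp only [build_polynomial_system, build_polynomial_system_alt]
  rw [PySem.List.foldl_append_singleton_eq_map (fun k =>
        ((PySem.List.pyRange 0 bits 1).foldl (fun ts i =>
          if 0 ≤ k - i ∧ k - i < bits then ts ++ [(i, k - i)] else ts) [],
         PySem.List.pyGetD ones_pp k 0)), List.nil_append]
  apply List.map_congr_left
  intro k hk
  rw [PySem.List.mem_pyRange_one] at hk
  have hlen : (k : Int) < (((PySem.List.pyRange 0 (2 * bits - 1) 1).map
      (fun _ => ([] : List (Int × Int)))).length : Int) := by
    simp [PySem.List.length_pyRange_one]; omega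
  rw [pv_outer_scatter bits bits.toNat 0 _ k (by omega) le_rfl hk.1 hlen]
  rw [PySem.List.pyGetD_map_pyRange_of_nonneg (fun _ => ([] : List (Int × Int))) (2 * bits - 1) k [] hk.1 hk.2]
  rw [List.nil_append]

-- ===== VERDICT (by name: the statement is the Claim_ definition above) =====
theorem build_polynomial_system_spec : Claim_equal_build_polynomial_system := by
  intro ones_pp bits _ _
  exact pv_main ones_pp bits
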